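-- pv_equiv track=rewrite | github.com/or7nge/sheet-music-transcriber | transcriber_core.py | _summarize_homr_error
-- ===== SOURCE A (Python) =====
-- def _summarize_homr_error(details: str) -> str:
--     lines = [line.strip() for line in details.splitlines() if line.strip()]
--     for line in reversed(lines):
--         if line.lower().startswith("exception:"):
--             return line
--     if lines:
--         return lines[-1]
--     return "Unknown homr error"
-- ===== SOURCE B (Python) =====
-- def _summarize_homr_error(details: str) -> str:
--     last_line = None
--     last_exception = None
--     for raw in details.splitlines():
--         line = raw.strip()
--         if not line:
--             continue
--         last_line = line
--         if line.lower().startswith("exception:"):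
--             last_exception = line
--     if last_exception is not None:
--         return last_exception
--     if last_line is not None:
--         return last_line
--     return "Unknown homr error"
-- ===== Notes on version B (the rewrite author's own statement) =====
-- stated objective: alternative
-- what changed: Single forward pass keeping last non-empty line and last exception-prefixed line as state, instead of building a filtered list and scanning it in reverse.
import Mathlib
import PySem

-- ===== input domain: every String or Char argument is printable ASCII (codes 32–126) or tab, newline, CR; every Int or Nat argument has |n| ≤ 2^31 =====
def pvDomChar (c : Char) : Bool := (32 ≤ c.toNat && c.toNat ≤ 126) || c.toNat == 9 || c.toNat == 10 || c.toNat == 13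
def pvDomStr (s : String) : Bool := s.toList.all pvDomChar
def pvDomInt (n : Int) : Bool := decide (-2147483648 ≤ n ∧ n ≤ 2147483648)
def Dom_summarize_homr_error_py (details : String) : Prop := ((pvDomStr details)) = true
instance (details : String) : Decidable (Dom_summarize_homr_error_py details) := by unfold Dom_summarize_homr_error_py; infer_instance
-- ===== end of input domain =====

-- B replaces A's filtered-list build + reverse scan by a single forward pass keeping the
-- last non-empty and last "exception:" lines as state; same values, alternative decomposition.


-- ===== PORT A =====
-- whether line.lower().startswith("exception:")
def pvIsExc (l : String) : Bool := PySem.Str.startswith (PySem.Str.lower l) "exception:"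

-- 'for line in reversed(lines): if …: return line' as structural recursion with early return
def pvALoop : List String → Option String
  | [] => none
  | l :: rest => if pvIsExc l then some l else pvALoop rest

def summarize_homr_error_py (details : String) : String :=
  let lines := ((PySem.Str.splitlines details).map PySem.Str.strip).filter (fun l => !(l == ""))
  match pvALoop lines.reverse with
  | some l => l
  | none =>
    match PySem.List.pyGet? lines (-1) with   -- 'if lines: return lines[-1]'
    | some l => l
    | none => "Unknown homr error"

-- ===== PORT B =====
-- state = (last_line, last_exception)
def pvBStep (st : Option String × Option String) (raw : String) : Option String × Option String :=
  let line := PySem.Str.strip raw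
  if line == "" then st
  else if PySem.Str.startswith (PySem.Str.lower line) "exception:" then (some line, some line)
  else (some line, st.2)

def summarize_homr_error_py_alt (details : String) : String :=
  let st := (PySem.Str.splitlines details).foldl pvBStep (none, none)
  match st.2 with
  | some l => l
  | none =>
    match st.1 with
    | some l => l
    | none => "Unknown homr error"

-- ===== PRECONDITION & SPEC =====
def Spec_summarize_homr_error_py (details : String) (out : String) : Prop := out = summarize_homr_error_py_alt details
instance (details : String) (out : String) : Decidable (Spec_summarize_homr_error_py details out) := by unfold Spec_summarize_homr_error_py; infer_instance

-- ===== CLAIM (what is proved, stated in full; the proofs are below) =====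
def Claim_equal_summarize_homr_error_py : Prop := ∀ (details : String), Dom_summarize_homr_error_py details → Spec_summarize_homr_error_py details (summarize_homr_error_py details)

-- ===== LEMMAS AND PROOFS =====

def pvLines (ls : List String) : List String :=
  (ls.map PySem.Str.strip).filter (fun l => !(l == ""))

theorem pvBStep_eq (st : Option String × Option String) (r : String) :
    pvBStep st r =
      (let line := PySem.Str.strip r;
       if line == "" then st
       else if pvIsExc line then (some line, some line)
       else (some line, st.2)) := rfl

theorem pvALoop_append (xs ys : List String) :
    pvALoop (xs ++ ys) = ((pvALoop xs).orElse (fun _ => pvALoop ys)) := by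
  induction xs with
  | nil => simp [pvALoop]
  | cons x xs ih =>
    simp only [List.cons_append, pvALoop]
    split <;> simp [ih]

-- the loop invariant: folding B's step from any state
theorem pvFold_char (ls : List String) (st : Option String × Option String) :
    ls.foldl pvBStep st =
      (((pvLines ls).getLast?).orElse (fun _ => st.1),
       (pvALoop (pvLines ls).reverse).orElse (fun _ => st.2)) := by
  induction ls generalizing st with
  | nil => simp [pvLines, pvALoop]
  | cons r ls ih =>
    simp only [List.foldl_cons, ih]
    by_cases h : PySem.Str.strip r = ""
    · simp [pvBStep_eq, pvLines, h]
    · have hl : pvLines (r :: ls) = PySem.Str.strip r :: pvLines ls := by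
        simp [pvLines, h]
      rw [hl, List.reverse_cons, pvALoop_append]
      by_cases he : pvIsExc (PySem.Str.strip r) <;>
        cases hgl : (pvLines ls).getLast? <;>
          cases hal : pvALoop (pvLines ls).reverse <;>
            simp [pvBStep_eq, pvALoop, h, he, hgl, hal, List.getLast?_cons, Option.orElse]

-- ===== VERDICT (by name: the statement is the Claim_ definition above) =====
theorem summarize_homr_error_py_spec : Claim_equal_summarize_homr_error_py := by
  intro details _
  show summarize_homr_error_py details = summarize_homr_error_py_alt details
  simp only [summarize_homr_error_py, summarize_homr_error_py_alt, pvFold_char,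
    PySem.List.pyGet?_neg_one, pvLines]
  set L := ((PySem.Str.splitlines details).map PySem.Str.strip).filter (fun l => !(l == "")) with hL
  cases hal : pvALoop L.reverse <;> cases hgl : L.getLast? <;> rfl
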